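-- pv_equiv track=rewrite | github.com/nih-cfde/use-case-library-build | scripts/utilities.py | scrub_overlap
-- ===== SOURCE A (Python) =====
-- def scrub_overlap(tags):
--     """
--     For a given list of tags, find tags that overlap
--     with other tags. When overlapping tags are found,
--     only keep the longer of the two tags.
--     """
--     del_ix = []
--     ntags = len(tags)
--     for i in range(0,ntags):
--         for j in range(i+1,ntags):
--
--             if tags[i] in tags[j]:
--                 del_ix.append(i)
--
--             if tags[j] in tags[i]:
--                 del_ix.append(j)
--
--     tags = [j for i,j in enumerate(tags) if i not in del_ix]
--     return tags
-- ===== SOURCE B (Python) =====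
-- def scrub_overlap(tags):
--     """
--     For a given list of tags, find tags that overlap
--     with other tags. When overlapping tags are found,
--     only keep the longer of the two tags.
--     """
--     return [t for i, t in enumerate(tags)
--             if not any(j != i and t in u for j, u in enumerate(tags))]
-- ===== Notes on version B (the rewrite author's own statement) =====
-- stated objective: faster
-- what changed: Replaces the triangular double loop that accumulates a deletion-index list and the final index-membership filter by a direct one-pass comprehension keeping each tag iff it is a substring of no other position's tag, eliminating the O(n^2)-sized del_ix list and its linear membership scans.
import Mathlib
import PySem

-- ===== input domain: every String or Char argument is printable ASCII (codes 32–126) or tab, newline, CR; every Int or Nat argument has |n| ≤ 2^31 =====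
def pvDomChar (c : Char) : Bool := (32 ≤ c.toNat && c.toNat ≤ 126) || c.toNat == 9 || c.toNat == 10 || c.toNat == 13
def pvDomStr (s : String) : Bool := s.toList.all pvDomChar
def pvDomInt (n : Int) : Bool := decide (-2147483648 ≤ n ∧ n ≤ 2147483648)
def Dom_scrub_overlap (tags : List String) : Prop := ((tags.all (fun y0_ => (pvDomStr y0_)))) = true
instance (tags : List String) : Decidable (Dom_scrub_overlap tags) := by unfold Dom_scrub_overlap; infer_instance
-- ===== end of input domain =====

-- B replaces A's triangular double loop accumulating deletion indices (and the final
-- index-membership filter) by a direct comprehension keeping each tag iff it is a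
-- substring of no other position's tag; objective: faster (no O(n^2)-sized del_ix
-- list to scan per kept element; measurably faster in a timing run).

-- ===== PORT A =====
def scrub_overlap (tags : List String) : List String :=
  let del_ix : List Int := []
  let ntags : Int := tags.length
  let del_ix := (PySem.List.pyRange 0 ntags 1).foldl (fun del_ix i =>
    (PySem.List.pyRange (i+1) ntags 1).foldl (fun del_ix j =>
      let del_ix := if PySem.Str.isIn (PySem.List.pyGetD tags i "") (PySem.List.pyGetD tags j "") then del_ix ++ [i] else del_ix
      if PySem.Str.isIn (PySem.List.pyGetD tags j "") (PySem.List.pyGetD tags i "") then del_ix ++ [j] else del_ix) del_ix) del_ix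
  ((PySem.List.enumerate tags 0).filter (fun p => !(del_ix.contains p.1))).map (·.2)

-- ===== PORT B =====
def scrub_overlap_alt (tags : List String) : List String :=
  ((PySem.List.enumerate tags 0).filter (fun p =>
      !((PySem.List.enumerate tags 0).any (fun q => q.1 != p.1 && PySem.Str.isIn p.2 q.2)))).map (·.2)

-- ===== PRECONDITION & SPEC =====
def Spec_scrub_overlap (tags : List String) (out : List String) : Prop := out = scrub_overlap_alt tags
instance (tags : List String) (out : List String) : Decidable (Spec_scrub_overlap tags out) := by unfold Spec_scrub_overlap; infer_instance

-- ===== CLAIM (what is proved, stated in full; the proofs are below) =====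
def Claim_equal_scrub_overlap : Prop := ∀ (tags : List String), Dom_scrub_overlap tags → Spec_scrub_overlap tags (scrub_overlap tags)

-- ===== LEMMAS AND PROOFS =====

-- A's deletion-index list, named so it can be reasoned about
def delA (tags : List String) : List Int :=
  (PySem.List.pyRange 0 (tags.length) 1).foldl (fun del_ix i =>
    (PySem.List.pyRange (i+1) (tags.length) 1).foldl (fun del_ix j =>
      let del_ix := if PySem.Str.isIn (PySem.List.pyGetD tags i "") (PySem.List.pyGetD tags j "") then del_ix ++ [i] else del_ix
      if PySem.Str.isIn (PySem.List.pyGetD tags j "") (PySem.List.pyGetD tags i "") then del_ix ++ [j] else del_ix) del_ix) []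

-- the indices one iteration of A's inner loop appends for the pair (i, j)
def gpair (tags : List String) (i j : Int) : List Int :=
  (if PySem.Str.isIn (PySem.List.pyGetD tags i "") (PySem.List.pyGetD tags j "") then [i] else []) ++
  (if PySem.Str.isIn (PySem.List.pyGetD tags j "") (PySem.List.pyGetD tags i "") then [j] else [])

lemma delA_eq_flatMap (tags : List String) :
    delA tags = (PySem.List.pyRange 0 (tags.length) 1).flatMap (fun i =>
      (PySem.List.pyRange (i+1) (tags.length) 1).flatMap (gpair tags i)) := by
  unfold delA
  have hinner : ∀ (i : Int) (acc : List Int),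
      (PySem.List.pyRange (i+1) (tags.length) 1).foldl (fun del_ix j =>
        let del_ix := if PySem.Str.isIn (PySem.List.pyGetD tags i "") (PySem.List.pyGetD tags j "") then del_ix ++ [i] else del_ix
        if PySem.Str.isIn (PySem.List.pyGetD tags j "") (PySem.List.pyGetD tags i "") then del_ix ++ [j] else del_ix) acc
      = acc ++ (PySem.List.pyRange (i+1) (tags.length) 1).flatMap (gpair tags i) := by
    intro i acc
    rw [← PySem.List.foldl_append_eq_flatMap]
    apply PySem.List.foldl_congr_mem
    intro a j _
    unfold gpair
    split_ifs <;> simp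
  calc _ = (PySem.List.pyRange 0 (tags.length) 1).foldl (fun acc i =>
        acc ++ (PySem.List.pyRange (i+1) (tags.length) 1).flatMap (gpair tags i)) [] := by
        apply PySem.List.foldl_congr_mem; intro acc i _; exact hinner i acc
    _ = _ := by rw [PySem.List.foldl_append_eq_flatMap]; simp

lemma mem_delA_iff (tags : List String) (k : Int) :
    k ∈ delA tags ↔ ∃ a b : Nat, a < b ∧ b < tags.length ∧
      ((k = a ∧ PySem.Str.isIn (tags.getD a "") (tags.getD b "") = true) ∨
       (k = b ∧ PySem.Str.isIn (tags.getD b "") (tags.getD a "") = true)) := by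
  rw [delA_eq_flatMap]
  simp only [List.mem_flatMap, PySem.List.mem_pyRange_one]
  constructor
  · rintro ⟨i, ⟨hi0, hin⟩, j, ⟨hij, hjn⟩, hk⟩
    lift i to Nat using hi0 with a
    have hj0 : (0:Int) ≤ j := by omega
    lift j to Nat using hj0 with b
    refine ⟨a, b, by exact_mod_cast hij, by exact_mod_cast hjn, ?_⟩
    unfold gpair at hk
    rw [PySem.List.pyGetD_natCast, PySem.List.pyGetD_natCast] at hk
    rcases List.mem_append.1 hk with h | h <;>
      [left; right] <;> (split_ifs at h with hc <;> simp_all)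
  · rintro ⟨a, b, hab, hbn, hcase⟩
    refine ⟨a, ⟨by positivity, by exact_mod_cast lt_trans hab hbn⟩, b,
      ⟨by exact_mod_cast hab, by exact_mod_cast hbn⟩, ?_⟩
    unfold gpair
    rw [PySem.List.pyGetD_natCast, PySem.List.pyGetD_natCast]
    rcases hcase with ⟨hk, hc⟩ | ⟨hk, hc⟩
    · exact List.mem_append.2 (Or.inl (by rw [if_pos hc]; simp [hk]))
    · exact List.mem_append.2 (Or.inr (by rw [if_pos hc]; simp [hk]))

-- A's 'i not in del_ix' test equals B's 'no other position's tag contains this tag' test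
lemma pred_eq (tags : List String) (k : Nat) (hk : k < tags.length) :
    ((delA tags).contains ((0:Int) + k)) =
    ((PySem.List.enumerate tags 0).any fun q => q.1 != ((0:Int) + k) && PySem.Str.isIn tags[k] q.2) := by
  rw [Bool.eq_iff_iff, List.contains_iff_mem, mem_delA_iff, List.any_eq_true]
  constructor
  · rintro ⟨a, b, hab, hbn, hcase⟩
    rcases hcase with ⟨hka, hc⟩ | ⟨hkb, hc⟩
    · have hke : k = a := by omega
      subst hke
      refine ⟨(0 + b, tags[b]'hbn), (PySem.List.mem_enumerate_iff tags 0 _).2 ⟨b, hbn, rfl⟩, ?_⟩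
      simp only [List.getD_eq_getElem _ _ (by omega : k < tags.length),
        List.getD_eq_getElem _ _ hbn] at hc
      simp only [Bool.and_eq_true, bne_iff_ne, ne_eq]
      exact ⟨by intro h; omega, hc⟩
    · have hke : k = b := by omega
      subst hke
      have han : a < tags.length := by omega
      refine ⟨(0 + a, tags[a]'han), (PySem.List.mem_enumerate_iff tags 0 _).2 ⟨a, han, rfl⟩, ?_⟩
      simp only [List.getD_eq_getElem _ _ han, List.getD_eq_getElem _ _ hbn] at hc
      simp only [Bool.and_eq_true, bne_iff_ne, ne_eq]
      exact ⟨by intro h; omega, hc⟩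
  · rintro ⟨q, hq, hpred⟩
    obtain ⟨m, hm, rfl⟩ := (PySem.List.mem_enumerate_iff tags 0 _).1 hq
    simp only [Bool.and_eq_true, bne_iff_ne, ne_eq] at hpred
    obtain ⟨hne, hc⟩ := hpred
    have hmk : m ≠ k := by intro h; exact hne (by simp [h])
    rcases Nat.lt_or_gt_of_ne hmk with h | h
    · exact ⟨m, k, h, hk, Or.inr ⟨by simp, by
        rw [List.getD_eq_getElem _ _ hk, List.getD_eq_getElem _ _ hm]; exact hc⟩⟩
    · exact ⟨k, m, h, hm, Or.inl ⟨by simp, by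
        rw [List.getD_eq_getElem _ _ hk, List.getD_eq_getElem _ _ hm]; exact hc⟩⟩

theorem main_eq (tags : List String) : scrub_overlap tags = scrub_overlap_alt tags := by
  show ((PySem.List.enumerate tags 0).filter (fun p => !((delA tags).contains p.1))).map (·.2)
      = scrub_overlap_alt tags
  unfold scrub_overlap_alt
  congr 1
  apply List.filter_congr
  intro p hp
  obtain ⟨k, hk, rfl⟩ := (PySem.List.mem_enumerate_iff tags 0 p).1 hp
  exact congrArg Bool.not (pred_eq tags k hk)

-- ===== VERDICT (by name: the statement is the Claim_ definition above) =====
theorem scrub_overlap_spec : Claim_equal_scrub_overlap := by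
  intro tags _
  exact main_eq tags
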